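-- pv_equiv track=rewrite | github.com/GavinGuan95/Punctuator.Pytorch | data/ted_transcript.py | process_alignment
-- ===== SOURCE A (Python) =====
-- def process_alignment(alignment):
--     alignment_index = []
--     for i, (x, y) in enumerate(zip(alignment[0], alignment[1])):
--         if x == y:
--             alignment_index.append(i)
--     transcript_section = alignment[0][min(alignment_index):(max(alignment_index)+1)]
--     transcript = transcript_section.replace("-", "")
--     return transcript
-- ===== SOURCE B (Python) =====
-- def process_alignment(alignment):
--     pairs = list(zip(alignment[0], alignment[1]))
--     first = next(i for i, (x, y) in enumerate(pairs) if x == y)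
--     last = len(pairs) - 1 - next(i for i, (x, y) in enumerate(reversed(pairs)) if x == y)
--     return alignment[0][first:last + 1].replace("-", "")
-- ===== Notes on version B (the rewrite author's own statement) =====
-- stated objective: alternative
-- what changed: B replaces A's full pass that collects every matching index into a list and then takes min/max of it with a short forward scan for the first match and a short backward scan over the reversed pairs for the last match, slicing directly.
-- outside the precondition, e.g. on process_alignment(('ab', 'cd')): A raises ValueError, B raises StopIteration
import Mathlib
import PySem

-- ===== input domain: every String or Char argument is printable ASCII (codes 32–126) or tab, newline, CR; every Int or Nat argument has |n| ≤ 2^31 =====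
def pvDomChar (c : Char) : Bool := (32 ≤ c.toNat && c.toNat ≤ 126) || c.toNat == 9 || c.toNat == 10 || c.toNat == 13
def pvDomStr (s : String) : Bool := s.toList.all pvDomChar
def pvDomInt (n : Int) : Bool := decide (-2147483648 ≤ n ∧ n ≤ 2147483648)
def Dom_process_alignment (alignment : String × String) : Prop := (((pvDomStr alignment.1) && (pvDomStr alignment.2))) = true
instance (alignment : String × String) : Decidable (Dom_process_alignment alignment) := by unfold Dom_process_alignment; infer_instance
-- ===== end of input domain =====

-- B replaces A's collect-all-indices + min/max pass by a forward scan for the first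
-- matching position and a backward scan over the reversed pairs for the last one.


-- ===== PORT A =====
def process_alignment (alignment : String × String) : String :=
  let alignment_index : List Int :=
    (PySem.List.enumerate (alignment.1.toList.zip alignment.2.toList)).foldl
      (fun acc p => if p.2.1 == p.2.2 then acc ++ [p.1] else acc) []
  match PySem.List.min? alignment_index (fun v => v), PySem.List.max? alignment_index (fun v => v) with
  | some mn, some mx =>
      PySem.Str.replace (PySem.Str.slice alignment.1 (some mn) (some (mx + 1))) "-" ""
  | _, _ => ""   -- unreachable under Pre_: min([]) raises ValueError in Python

-- ===== PORT B =====
-- next(i for i, (x, y) in enumerate(pairs) if x == y): index of the first matching pair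
def pvFirstMatch : List (Char × Char) → Option Nat
  | [] => none
  | (x, y) :: t => if x == y then some 0 else (pvFirstMatch t).map (· + 1)

def process_alignment_alt (alignment : String × String) : String :=
  let pairs := alignment.1.toList.zip alignment.2.toList
  match pvFirstMatch pairs with
  | none => ""   -- unreachable under Pre_: next() raises StopIteration in Python
  | some first =>
    match pvFirstMatch pairs.reverse with
    | none => ""
    | some k =>
      let last := pairs.length - 1 - k
      PySem.Str.replace
        (PySem.Str.slice alignment.1 (some (first : Int)) (some ((last : Int) + 1))) "-" ""

-- ===== PRECONDITION & SPEC =====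
-- Pre_ excludes exactly the inputs with no position where the two strings agree,
-- on which A raises ValueError (min of an empty list).
def Pre_process_alignment (alignment : String × String) : Prop :=
  (alignment.1.toList.zip alignment.2.toList).any (fun p => p.1 == p.2) = true
instance (alignment : String × String) : Decidable (Pre_process_alignment alignment) := by
  unfold Pre_process_alignment; infer_instance
def pvWitness_process_alignment : (String × String) := ("a-b", "axb")

def Spec_process_alignment (alignment : String × String) (out : String) : Prop := out = process_alignment_alt alignment
instance (alignment : String × String) (out : String) : Decidable (Spec_process_alignment alignment out) := by unfold Spec_process_alignment; infer_instance

-- ===== CLAIM (what is proved, stated in full; the proofs are below) =====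
def Claim_equal_process_alignment : Prop := ∀ (alignment : String × String), Dom_process_alignment alignment → Pre_process_alignment alignment → Spec_process_alignment alignment (process_alignment alignment)

-- ===== LEMMAS AND PROOFS =====

-- the list of matching indices, counting from s (A's alignment_index with s = 0)
def pvMatchList : List (Char × Char) → Int → List Int
  | [], _ => []
  | (x, y) :: t, s => (if x == y then [s] else []) ++ pvMatchList t (s + 1)

theorem pvFoldl_eq_matchList (l : List (Char × Char)) (s : Int) (acc : List Int) :
    (PySem.List.enumerate l s).foldl
      (fun acc p => if p.2.1 == p.2.2 then acc ++ [p.1] else acc) acc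
      = acc ++ pvMatchList l s := by
  induction l generalizing s acc with
  | nil => simp [pvMatchList, PySem.List.enumerate_nil]
  | cons h t ih =>
    obtain ⟨x, y⟩ := h
    simp only [PySem.List.enumerate_cons, List.foldl_cons, pvMatchList]
    by_cases hxy : (x == y) = true
    · simp only [hxy, ih, List.append_assoc]
      simp
    · simp only [hxy, ih]
      simp

theorem pvMatchList_mem_bounds (l : List (Char × Char)) (s : Int) :
    ∀ x ∈ pvMatchList l s, s ≤ x ∧ x < s + l.length := by
  induction l generalizing s with
  | nil => simp [pvMatchList]
  | cons h t ih =>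
    obtain ⟨a, b⟩ := h
    intro x hx
    simp only [pvMatchList, List.mem_append] at hx
    simp only [List.length_cons]
    rcases hx with hx | hx
    · split at hx
      · simp at hx; omega
      · simp at hx
    · have := ih (s + 1) x hx
      omega

theorem pvMatchList_append (u v : List (Char × Char)) (s : Int) :
    pvMatchList (u ++ v) s = pvMatchList u s ++ pvMatchList v (s + u.length) := by
  induction u generalizing s with
  | nil => simp [pvMatchList]
  | cons h t ih =>
    obtain ⟨a, b⟩ := h
    have hc : s + ((t.length + 1 : Nat) : Int) = s + 1 + (t.length : Int) := by
      push_cast; ring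
    simp only [List.cons_append, pvMatchList, ih, List.length_cons, hc, List.append_assoc]

theorem pvFoldl_min_of_le (t : List Int) (x : Int) (h : ∀ y ∈ t, x ≤ y) :
    t.foldl min x = x := by
  induction t generalizing x with
  | nil => rfl
  | cons a t ih =>
    simp only [List.foldl_cons]
    have hxa : min x a = x := min_eq_left (h a (by simp))
    rw [hxa]; exact ih x (fun y hy => h y (by simp [hy]))

theorem pvFoldl_max_le (t : List Int) (x m : Int) (hx : x ≤ m) (h : ∀ y ∈ t, y ≤ m) :
    t.foldl max x ≤ m := by
  induction t generalizing x with
  | nil => exact hx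
  | cons a t ih =>
    simp only [List.foldl_cons]
    exact ih (max x a) (max_le hx (h a (by simp))) (fun y hy => h y (by simp [hy]))

theorem pvMin_matchList (l : List (Char × Char)) (s : Int) :
    PySem.List.min? (pvMatchList l s) (fun v => v)
      = (pvFirstMatch l).map (fun k => s + (k : Int)) := by
  induction l generalizing s with
  | nil => simp [pvMatchList, pvFirstMatch, PySem.List.min?_eq_none_iff]
  | cons h t ih =>
    obtain ⟨x, y⟩ := h
    by_cases hxy : (x == y) = true
    · simp only [pvMatchList, pvFirstMatch, hxy, if_true, List.singleton_append]
      rw [PySem.List.min?_id_cons]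
      have : (pvMatchList t (s + 1)).foldl min s = s := by
        apply pvFoldl_min_of_le
        intro y hy
        have := pvMatchList_mem_bounds t (s + 1) y hy
        omega
      simp [this]
    · rw [show pvMatchList ((x, y) :: t) s = pvMatchList t (s + 1) by
        simp [pvMatchList, hxy]]
      rw [show pvFirstMatch ((x, y) :: t) = (pvFirstMatch t).map (· + 1) by
        simp [pvFirstMatch, hxy]]
      rw [ih]
      cases pvFirstMatch t with
      | none => rfl
      | some k =>
        simp
        omega

theorem pvMax_matchList (l : List (Char × Char)) (s : Int) :
    PySem.List.max? (pvMatchList l s) (fun v => v)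
      = (pvFirstMatch l.reverse).map (fun k => s + ((l.length - 1 - k : Nat) : Int)) := by
  induction l using List.reverseRecOn generalizing s with
  | nil => simp [pvMatchList, pvFirstMatch, PySem.List.max?_eq_none_iff]
  | append_singleton t a ih =>
    obtain ⟨x, y⟩ := a
    rw [pvMatchList_append]
    have hrev : (t ++ [(x, y)]).reverse = (x, y) :: t.reverse := by simp
    rw [hrev]
    by_cases hxy : (x == y) = true
    · have hml : pvMatchList [(x, y)] (s + t.length) = [s + t.length] := by
        simp [pvMatchList, hxy]
      rw [hml]
      simp only [pvFirstMatch, hxy, if_true]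
      cases hm : pvMatchList t s with
      | nil =>
        simp only [List.nil_append, PySem.List.max?_id_cons, List.foldl_nil,
          Option.map_some, Option.some.injEq, List.length_append, List.length_cons,
          List.length_nil]
        omega
      | cons b u =>
        rw [List.cons_append, PySem.List.max?_id_cons]
        have hfold : (u ++ [s + (t.length : Int)]).foldl max b = s + t.length := by
          rw [List.foldl_append]
          simp only [List.foldl_cons, List.foldl_nil]
          apply max_eq_right
          apply pvFoldl_max_le
          · have := pvMatchList_mem_bounds t s b (by rw [hm]; simp)
            omega
          · intro y hy
            have := pvMatchList_mem_bounds t s y (by rw [hm]; simp [hy])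
            omega
        rw [hfold]
        simp only [Option.map_some, Option.some.injEq, List.length_append,
          List.length_cons, List.length_nil]
        omega
    · have hml : pvMatchList [(x, y)] (s + t.length) = [] := by
        simp [pvMatchList, hxy]
      rw [hml, List.append_nil, ih]
      simp only [pvFirstMatch, hxy, if_false]
      cases hk : pvFirstMatch t.reverse with
      | none => rfl
      | some k =>
        simp
        omega

theorem pvFirstMatch_isSome (l : List (Char × Char))
    (h : l.any (fun p => p.1 == p.2) = true) : (pvFirstMatch l).isSome := by
  induction l with
  | nil => simp at h
  | cons c t ih =>
    obtain ⟨x, y⟩ := c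
    simp only [List.any_cons, Bool.or_eq_true] at h
    by_cases hxy : (x == y) = true
    · simp [pvFirstMatch, hxy]
    · have ht : t.any (fun p => p.1 == p.2) = true := by
        rcases h with h | h
        · exact absurd h hxy
        · exact h
      simp [pvFirstMatch, hxy, ih ht]

-- ===== VERDICT (by name: the statement is the Claim_ definition above) =====
theorem process_alignment_spec : Claim_equal_process_alignment := by
  intro al _hdom hpre
  unfold Pre_process_alignment at hpre
  unfold Spec_process_alignment process_alignment process_alignment_alt
  have h1 : (pvFirstMatch (al.1.toList.zip al.2.toList)).isSome :=
    pvFirstMatch_isSome _ hpre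
  have h2 : (pvFirstMatch (al.1.toList.zip al.2.toList).reverse).isSome := by
    apply pvFirstMatch_isSome
    simpa [List.any_reverse] using hpre
  obtain ⟨f, hf⟩ := Option.isSome_iff_exists.mp h1
  obtain ⟨k, hk⟩ := Option.isSome_iff_exists.mp h2
  have hidx : (PySem.List.enumerate (al.1.toList.zip al.2.toList)).foldl
      (fun acc p => if p.2.1 == p.2.2 then acc ++ [p.1] else acc) []
      = pvMatchList (al.1.toList.zip al.2.toList) 0 := by
    simpa using pvFoldl_eq_matchList (al.1.toList.zip al.2.toList) 0 []
  have hmin : PySem.List.min? (pvMatchList (al.1.toList.zip al.2.toList) 0) (fun v => v)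
      = some ((f : Int)) := by
    rw [pvMin_matchList, hf]; simp
  have hmax : PySem.List.max? (pvMatchList (al.1.toList.zip al.2.toList) 0) (fun v => v)
      = some ((((al.1.toList.zip al.2.toList).length - 1 - k : Nat) : Int)) := by
    rw [pvMax_matchList, hk]; simp
  simp only [hidx, hmin, hmax, hf, hk]
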